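-- pv_equiv track=rewrite | github.com/zan-maker/Mac-Mini-claw | defense_lead_gen_v2.py | score_company
-- ===== SOURCE A (Python) =====
-- def score_company(company):
--     """Score defense company (0-100)"""
--     score = 0
--
--     # Sector fit (0-30)
--     sector = company.get('sector', '').lower()
--     high_value_sectors = ['counter-drone', 'ai & drones', 'defense ai', 'cybersecurity']
--     if any(s in sector for s in high_value_sectors):
--         score += 30
--     elif any(s in sector for s in ['defense', 'drone', 'space', 'military']):
--         score += 25
--     elif 'autonomous' in sector:
--         score += 20
--     else:
--         score += 10
--
--     # Stage fit (0-20)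
--     stage = company.get('stage', '').lower()
--     if 'series a' in stage or 'series b' in stage or 'series c' in stage:
--         score += 20
--     elif 'series d' in stage or 'series e' in stage:
--         score += 15
--     elif 'private' in stage:
--         score += 12
--     elif 'seed' in stage:
--         score += 10
--     elif 'public' in stage:
--         score += 5
--
--     # Region match (0-10)
--     region = company.get('region', '').lower()
--     if region in ['us', 'usa', 'uk', 'eu', 'europe']:
--         score += 10
--     elif 'united states' in region:
--         score += 10
--
--     # Technical depth bonus (0-20)
--     name = company.get('name', '').lower()
--     if any(kw in name for kw in ['ai', 'quantum', 'cyber', 'autonomous']):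
--         score += 20
--     elif any(kw in name for kw in ['systems', 'tech', 'labs']):
--         score += 10
--
--     # Integration potential (0-20)
--     sector_lower = company.get('sector', '').lower()
--     if any(kw in sector_lower for kw in ['platform', 'ai', 'data', 'analytics']):
--         score += 20
--     elif any(kw in sector_lower for kw in ['systems', 'software']):
--         score += 15
--
--     return min(100, score)
-- ===== SOURCE B (Python) =====
-- def score_company(company):
--     """Score defense company (0-100)"""
--     def g(k):
--         return company.get(k, '').lower()
--     sector, stage, region, name = g('sector'), g('stage'), g('region'), g('name')
--     # Flat rule tables (match_kind, keyword, points); each block is scored as the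
--     # MAXIMUM points of any matching rule (correct because within a block the
--     # original tiers' point values are strictly descending, so max = first tier hit).
--     blocks = [
--         (sector, 10, [('sub', 'counter-drone', 30), ('sub', 'ai & drones', 30),
--                       ('sub', 'defense ai', 30), ('sub', 'cybersecurity', 30),
--                       ('sub', 'defense', 25), ('sub', 'drone', 25),
--                       ('sub', 'space', 25), ('sub', 'military', 25),
--                       ('sub', 'autonomous', 20)]),
--         (stage, 0, [('sub', 'series a', 20), ('sub', 'series b', 20), ('sub', 'series c', 20),
--                     ('sub', 'series d', 15), ('sub', 'series e', 15),
--                     ('sub', 'private', 12), ('sub', 'seed', 10), ('sub', 'public', 5)]),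
--         (region, 0, [('eq', 'us', 10), ('eq', 'usa', 10), ('eq', 'uk', 10),
--                      ('eq', 'eu', 10), ('eq', 'europe', 10),
--                      ('sub', 'united states', 10)]),
--         (name, 0, [('sub', 'ai', 20), ('sub', 'quantum', 20), ('sub', 'cyber', 20),
--                    ('sub', 'autonomous', 20),
--                    ('sub', 'systems', 10), ('sub', 'tech', 10), ('sub', 'labs', 10)]),
--         (sector, 0, [('sub', 'platform', 20), ('sub', 'ai', 20), ('sub', 'data', 20),
--                      ('sub', 'analytics', 20),
--                      ('sub', 'systems', 15), ('sub', 'software', 15)]),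
--     ]
--     total = sum(
--         max((pts for kind, kw, pts in rules
--              if (text == kw if kind == 'eq' else kw in text)),
--             default=d)
--         for text, d, rules in blocks)
--     return min(100, total)
-- ===== Notes on version B (the rewrite author's own statement) =====
-- stated objective: alternative
-- what changed: Replaces the five ordered if/elif first-match cascades with a flat rule table per block scored by taking the MAXIMUM points over all matching rules (with a default), correct because each block's tier points are strictly descending.
import Mathlib
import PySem

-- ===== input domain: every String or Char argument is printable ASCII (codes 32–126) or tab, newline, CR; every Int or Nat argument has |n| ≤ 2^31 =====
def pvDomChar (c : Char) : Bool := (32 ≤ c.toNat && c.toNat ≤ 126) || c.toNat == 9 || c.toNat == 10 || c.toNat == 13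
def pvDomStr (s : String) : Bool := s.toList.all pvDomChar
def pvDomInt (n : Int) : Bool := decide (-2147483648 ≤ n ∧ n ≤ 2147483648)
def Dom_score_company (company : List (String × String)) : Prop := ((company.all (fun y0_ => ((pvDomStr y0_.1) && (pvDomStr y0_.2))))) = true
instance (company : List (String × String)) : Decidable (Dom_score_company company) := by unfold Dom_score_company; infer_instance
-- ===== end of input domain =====

-- B scores each block as the maximum points over a flat rule table instead of A's ordered if/elif cascades; equal on all inputs.

-- ===== PORT A =====
-- company.get(k, '') : first-match lookup in the dict (assoc list)
def score_company (company : List (String × String)) : Int :=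
  let score : Int := 0
  -- Sector fit (0-30)
  let sector := PySem.Str.lower ((PySem.Dict.mk company).getD "sector" "")
  let score :=
    if ["counter-drone", "ai & drones", "defense ai", "cybersecurity"].any
        (fun s => PySem.Str.isIn s sector) then score + 30
    else if ["defense", "drone", "space", "military"].any
        (fun s => PySem.Str.isIn s sector) then score + 25
    else if PySem.Str.isIn "autonomous" sector then score + 20
    else score + 10
  -- Stage fit (0-20)
  let stage := PySem.Str.lower ((PySem.Dict.mk company).getD "stage" "")
  let score :=
    if PySem.Str.isIn "series a" stage || PySem.Str.isIn "series b" stage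
        || PySem.Str.isIn "series c" stage then score + 20
    else if PySem.Str.isIn "series d" stage || PySem.Str.isIn "series e" stage then score + 15
    else if PySem.Str.isIn "private" stage then score + 12
    else if PySem.Str.isIn "seed" stage then score + 10
    else if PySem.Str.isIn "public" stage then score + 5
    else score
  -- Region match (0-10)
  let region := PySem.Str.lower ((PySem.Dict.mk company).getD "region" "")
  let score :=
    if ["us", "usa", "uk", "eu", "europe"].contains region then score + 10
    else if PySem.Str.isIn "united states" region then score + 10
    else score
  -- Technical depth bonus (0-20)
  let name := PySem.Str.lower ((PySem.Dict.mk company).getD "name" "")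
  let score :=
    if ["ai", "quantum", "cyber", "autonomous"].any (fun kw => PySem.Str.isIn kw name) then score + 20
    else if ["systems", "tech", "labs"].any (fun kw => PySem.Str.isIn kw name) then score + 10
    else score
  -- Integration potential (0-20)
  let sector_lower := PySem.Str.lower ((PySem.Dict.mk company).getD "sector" "")
  let score :=
    if ["platform", "ai", "data", "analytics"].any (fun kw => PySem.Str.isIn kw sector_lower) then score + 20
    else if ["systems", "software"].any (fun kw => PySem.Str.isIn kw sector_lower) then score + 15
    else score
  min 100 score

-- ===== PORT B =====
-- rule match: exact equality for kind "eq", substring otherwise (Source B's conditional expression)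
def pvRuleMatch (text kind kw : String) : Bool :=
  if kind == "eq" then text == kw else PySem.Str.isIn kw text

-- the generator: points of the rules that match
def pvCollect : List (Bool × Int) → List Int
  | [] => []
  | (b, p) :: rs => if b then p :: pvCollect rs else pvCollect rs

-- Python max(xs, default=d)
def pvMaxD (d : Int) : List Int → Int
  | [] => d
  | x :: xs => xs.foldl max x

-- one block: max points over matching rules, with default
def pvBlockScore (text : String) (d : Int) (rules : List (String × String × Int)) : Int :=
  pvMaxD d (pvCollect (rules.map (fun r => (pvRuleMatch text r.1 r.2.1, r.2.2))))

def score_company_alt (company : List (String × String)) : Int :=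
  let g := fun (k : String) => PySem.Str.lower ((PySem.Dict.mk company).getD k "")
  let sector := g "sector"
  let stage := g "stage"
  let region := g "region"
  let name := g "name"
  let total :=
    pvBlockScore sector 10
      [("sub", "counter-drone", 30), ("sub", "ai & drones", 30),
       ("sub", "defense ai", 30), ("sub", "cybersecurity", 30),
       ("sub", "defense", 25), ("sub", "drone", 25),
       ("sub", "space", 25), ("sub", "military", 25),
       ("sub", "autonomous", 20)]
    + pvBlockScore stage 0
      [("sub", "series a", 20), ("sub", "series b", 20), ("sub", "series c", 20),
       ("sub", "series d", 15), ("sub", "series e", 15),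
       ("sub", "private", 12), ("sub", "seed", 10), ("sub", "public", 5)]
    + pvBlockScore region 0
      [("eq", "us", 10), ("eq", "usa", 10), ("eq", "uk", 10),
       ("eq", "eu", 10), ("eq", "europe", 10),
       ("sub", "united states", 10)]
    + pvBlockScore name 0
      [("sub", "ai", 20), ("sub", "quantum", 20), ("sub", "cyber", 20),
       ("sub", "autonomous", 20),
       ("sub", "systems", 10), ("sub", "tech", 10), ("sub", "labs", 10)]
    + pvBlockScore sector 0
      [("sub", "platform", 20), ("sub", "ai", 20), ("sub", "data", 20),
       ("sub", "analytics", 20),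
       ("sub", "systems", 15), ("sub", "software", 15)]
  min 100 total

-- ===== PRECONDITION & SPEC =====
def Spec_score_company (company : List (String × String)) (out : Int) : Prop := out = score_company_alt company
instance (company : List (String × String)) (out : Int) : Decidable (Spec_score_company company out) := by unfold Spec_score_company; infer_instance

-- ===== CLAIM (what is proved, stated in full; the proofs are below) =====
def Claim_equal_score_company : Prop := ∀ (company : List (String × String)), Dom_score_company company → Spec_score_company company (score_company company)

-- ===== LEMMAS AND PROOFS =====

-- A's 'score += …' cascades written as acc + block value
theorem pv_shift2 (x a b : Int) (p q : Prop) [Decidable p] [Decidable q] :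
    (if p then x + a else if q then x + b else x)
      = x + (if p then a else if q then b else 0) := by
  split_ifs <;> ring

theorem pv_shift3 (x a b c d : Int) (p q r : Prop) [Decidable p] [Decidable q] [Decidable r] :
    (if p then x + a else if q then x + b else if r then x + c else x + d)
      = x + (if p then a else if q then b else if r then c else d) := by
  split_ifs <;> ring

theorem pv_shift5 (x a b c d e : Int) (p q r s t : Prop)
    [Decidable p] [Decidable q] [Decidable r] [Decidable s] [Decidable t] :
    (if p then x + a else if q then x + b else if r then x + c
     else if s then x + d else if t then x + e else x)
      = x + (if p then a else if q then b else if r then c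
             else if s then d else if t then e else 0) := by
  split_ifs <;> ring

-- cascade = max over matching rules, per block shape, over abstract booleans
theorem pv_blk_sector (c1 c2 c3 c4 c5 c6 c7 c8 c9 : Bool) :
    pvMaxD 10 (pvCollect [(c1,30),(c2,30),(c3,30),(c4,30),(c5,25),(c6,25),(c7,25),(c8,25),(c9,20)])
      = (if (c1 || c2 || c3 || c4) = true then (30:Int)
         else if (c5 || c6 || c7 || c8) = true then 25
         else if c9 = true then 20 else 10) := by
  revert c1 c2 c3 c4 c5 c6 c7 c8 c9; decide

theorem pv_blk_stage (c1 c2 c3 c4 c5 c6 c7 c8 : Bool) :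
    pvMaxD 0 (pvCollect [(c1,20),(c2,20),(c3,20),(c4,15),(c5,15),(c6,12),(c7,10),(c8,5)])
      = (if (c1 || c2 || c3) = true then (20:Int)
         else if (c4 || c5) = true then 15
         else if c6 = true then 12
         else if c7 = true then 10
         else if c8 = true then 5 else 0) := by
  revert c1 c2 c3 c4 c5 c6 c7 c8; decide

theorem pv_blk_region (c1 c2 c3 c4 c5 c6 : Bool) :
    pvMaxD 0 (pvCollect [(c1,10),(c2,10),(c3,10),(c4,10),(c5,10),(c6,10)])
      = (if (c1 || c2 || c3 || c4 || c5) = true then (10:Int)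
         else if c6 = true then 10 else 0) := by
  revert c1 c2 c3 c4 c5 c6; decide

theorem pv_blk_name (c1 c2 c3 c4 c5 c6 c7 : Bool) :
    pvMaxD 0 (pvCollect [(c1,20),(c2,20),(c3,20),(c4,20),(c5,10),(c6,10),(c7,10)])
      = (if (c1 || c2 || c3 || c4) = true then (20:Int)
         else if (c5 || c6 || c7) = true then 10 else 0) := by
  revert c1 c2 c3 c4 c5 c6 c7; decide

theorem pv_blk_integ (c1 c2 c3 c4 c5 c6 : Bool) :
    pvMaxD 0 (pvCollect [(c1,20),(c2,20),(c3,20),(c4,20),(c5,15),(c6,15)])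
      = (if (c1 || c2 || c3 || c4) = true then (20:Int)
         else if (c5 || c6) = true then 15 else 0) := by
  revert c1 c2 c3 c4 c5 c6; decide

-- ===== VERDICT (by name: the statement is the Claim_ definition above) =====
theorem score_company_spec : Claim_equal_score_company := by
  intro company _
  show score_company company = score_company_alt company
  unfold score_company score_company_alt
  simp only [pvBlockScore, pvRuleMatch, List.map, List.any_cons, List.any_nil,
    Bool.or_false, Bool.or_assoc, String.reduceBEq, Bool.false_eq_true, if_true, if_false]
  rw [pv_blk_sector, pv_blk_stage, pv_blk_region, pv_blk_name, pv_blk_integ]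
  rw [pv_shift3, pv_shift5, pv_shift2, pv_shift2, pv_shift2]
  simp only [List.contains_eq_any_beq, List.any_cons, List.any_nil, Bool.or_false, Bool.or_assoc]
  ring_nf
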